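-- pv_equiv track=rewrite | github.com/Y36366363/News_fetching | api_sources_benchmark.py | reliability_tier_for_host
-- ===== SOURCE A (Python) =====
-- TIER_1_HOSTS = {
--     "reuters.com",
--     "bloomberg.com",
--     "ft.com",
--     "wsj.com",
--     "economist.com",
--     "cnbc.com",
--     "marketwatch.com",
--     "finance.yahoo.com",
--     "spglobal.com",
--     "imf.org",
--     "worldbank.org",
--     "ecb.europa.eu",
--     "federalreserve.gov",
--     "bankofengland.co.uk",
--     "boj.or.jp",
--     "bis.org",
-- }
--
-- TIER_2_HOSTS = {
--     "fxstreet.com",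
--     "investing.com",
--     "tradingview.com",
--     "forexlive.com",
--     "theedgemalaysia.com",
--     "channelnewsasia.com",
--     "financialpost.com",
--     "bnnbloomberg.ca",
--     "barrons.com",
--     "theguardian.com",
--     "nytimes.com",
--     "washingtonpost.com",
-- }
--
-- LOW_TRUST_HOSTS = {
--     "globenewswire.com",
--     "prnewswire.com",
--     "businesswire.com",
--     "accesswire.com",
--     "newsbtc.com",
--     "cointelegraph.com",
--     "cryptoslate.com",
--     "ambcrypto.com",
--     "theflightdeal.com",
-- }
--
-- def _canon_host(host: str) -> str:
--     h = (host or "").strip().lower()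
--     if h.startswith("www."):
--         h = h[4:]
--     return h
--
-- def reliability_tier_for_host(host: str) -> str:
--     h = _canon_host(host)
--     if not h:
--         return "tier_3"
--     if h in TIER_1_HOSTS:
--         return "tier_1"
--     if h in TIER_2_HOSTS:
--         return "tier_2"
--     if h in LOW_TRUST_HOSTS:
--         return "low"
--     # Handle common subdomains (e.g. www.reuters.com already handled, but also e.g. uk.reuters.com).
--     for base in TIER_1_HOSTS:
--         if h.endswith("." + base):
--             return "tier_1"
--     for base in TIER_2_HOSTS:
--         if h.endswith("." + base):
--             return "tier_2"
--     for base in LOW_TRUST_HOSTS: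
--         if h.endswith("." + base):
--             return "low"
--     return "tier_3"
-- ===== SOURCE B (Python) =====
-- TIER_1_HOSTS = {
--     "reuters.com", "bloomberg.com", "ft.com", "wsj.com", "economist.com",
--     "cnbc.com", "marketwatch.com", "finance.yahoo.com", "spglobal.com",
--     "imf.org", "worldbank.org", "ecb.europa.eu", "federalreserve.gov",
--     "bankofengland.co.uk", "boj.or.jp", "bis.org",
-- }
--
-- TIER_2_HOSTS = {
--     "fxstreet.com", "investing.com", "tradingview.com", "forexlive.com",
--     "theedgemalaysia.com", "channelnewsasia.com", "financialpost.com",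
--     "bnnbloomberg.ca", "barrons.com", "theguardian.com", "nytimes.com",
--     "washingtonpost.com",
-- }
--
-- LOW_TRUST_HOSTS = {
--     "globenewswire.com", "prnewswire.com", "businesswire.com", "accesswire.com",
--     "newsbtc.com", "cointelegraph.com", "cryptoslate.com", "ambcrypto.com",
--     "theflightdeal.com",
-- }
--
-- TIERS = (("tier_1", TIER_1_HOSTS), ("tier_2", TIER_2_HOSTS), ("low", LOW_TRUST_HOSTS))
--
-- def reliability_tier_for_host(host: str) -> str:
--     h = (host or "").strip().lower()
--     if h.startswith("www."):
--         h = h[4:]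
--     if not h:
--         return "tier_3"
--     for tier, hosts in TIERS:
--         if h in hosts:
--             return tier
--     # input-driven suffix lookups instead of scanning every known host with endswith
--     sufs = [h[i + 1:] for i, c in enumerate(h) if c == "."]
--     for tier, hosts in TIERS:
--         if any(s in hosts for s in sufs):
--             return tier
--     return "tier_3"
-- ===== Notes on version B (the rewrite author's own statement) =====
-- stated objective: alternative
-- what changed: Replaces A's six hand-written membership/endswith branches (one endswith scan over every known host per tier) with a single tier table looped twice plus input-driven suffix lookups: the dot-suffixes of the host are computed once and looked up in each tier's set.
import Mathlib
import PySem

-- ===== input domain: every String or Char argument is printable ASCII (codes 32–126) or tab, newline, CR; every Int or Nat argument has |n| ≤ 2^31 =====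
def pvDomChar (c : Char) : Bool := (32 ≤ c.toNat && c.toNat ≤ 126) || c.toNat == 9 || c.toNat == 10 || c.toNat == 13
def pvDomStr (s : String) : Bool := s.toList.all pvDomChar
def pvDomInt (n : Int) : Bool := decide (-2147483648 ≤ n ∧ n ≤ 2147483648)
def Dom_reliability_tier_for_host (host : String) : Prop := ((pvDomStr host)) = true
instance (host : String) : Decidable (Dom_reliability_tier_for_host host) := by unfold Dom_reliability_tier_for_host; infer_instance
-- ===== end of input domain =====

-- B replaces A's six fixed membership/endswith branches by a tier table looped twice plus
-- input-driven dot-suffix lookups (alternative decomposition, same results).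

-- ===== PORT A =====
def pvT1 : List String := ["reuters.com", "bloomberg.com", "ft.com", "wsj.com", "economist.com",
  "cnbc.com", "marketwatch.com", "finance.yahoo.com", "spglobal.com", "imf.org", "worldbank.org",
  "ecb.europa.eu", "federalreserve.gov", "bankofengland.co.uk", "boj.or.jp", "bis.org"]

def pvT2 : List String := ["fxstreet.com", "investing.com", "tradingview.com", "forexlive.com",
  "theedgemalaysia.com", "channelnewsasia.com", "financialpost.com", "bnnbloomberg.ca",
  "barrons.com", "theguardian.com", "nytimes.com", "washingtonpost.com"]

def pvLow : List String := ["globenewswire.com", "prnewswire.com", "businesswire.com",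
  "accesswire.com", "newsbtc.com", "cointelegraph.com", "cryptoslate.com", "ambcrypto.com",
  "theflightdeal.com"]

def pvCanonHost (host : String) : String :=
  let h := PySem.Str.lower (PySem.Str.strip host)
  if PySem.Str.startswith h "www." then PySem.Str.slice h (some 4) none else h

def reliability_tier_for_host (host : String) : String :=
  let h := pvCanonHost host
  if h = "" then "tier_3"
  else if pvT1.contains h then "tier_1"
  else if pvT2.contains h then "tier_2"
  else if pvLow.contains h then "low"
  else if pvT1.any (fun b => PySem.Str.endswith h ("." ++ b)) then "tier_1"
  else if pvT2.any (fun b => PySem.Str.endswith h ("." ++ b)) then "tier_2"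
  else if pvLow.any (fun b => PySem.Str.endswith h ("." ++ b)) then "low"
  else "tier_3"

-- ===== PORT B =====
def pvTiers : List (String × List String) := [("tier_1", pvT1), ("tier_2", pvT2), ("low", pvLow)]

-- [h[i+1:] for i, c in enumerate(h) if c == "."]
def pvSufs (h : String) : List String :=
  ((PySem.List.enumerate h.toList 0).filter (fun p => p.2 == '.')).map
    (fun p => PySem.Str.slice h (some (p.1 + 1)) none)

def reliability_tier_for_host_alt (host : String) : String :=
  let h := pvCanonHost host
  if h = "" then "tier_3"
  else
    match pvTiers.find? (fun p => p.2.contains h) with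
    | some p => p.1
    | none =>
      let sufs := pvSufs h
      match pvTiers.find? (fun p => sufs.any (fun s => p.2.contains s)) with
      | some p => p.1
      | none => "tier_3"

-- ===== PRECONDITION & SPEC =====
def Spec_reliability_tier_for_host (host : String) (out : String) : Prop := out = reliability_tier_for_host_alt host
instance (host : String) (out : String) : Decidable (Spec_reliability_tier_for_host host out) := by unfold Spec_reliability_tier_for_host; infer_instance

-- ===== CLAIM (what is proved, stated in full; the proofs are below) =====
def Claim_equal_reliability_tier_for_host : Prop := ∀ (host : String), Dom_reliability_tier_for_host host → Spec_reliability_tier_for_host host (reliability_tier_for_host host)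

-- ===== LEMMAS AND PROOFS =====

lemma pvSliceTail (h : String) (k : Nat) :
    (PySem.Str.slice h (some ((k : Int) + 1)) none).toList = h.toList.drop (k + 1) := by
  rw [PySem.Str.toList_slice, PySem.Chars.slice_eq_listSlice,
    show ((k : Int) + 1) = ((k + 1 : Nat) : Int) by push_cast; ring,
    PySem.List.slice_from_natCast]

lemma cons_suffix_iff (c : Char) (bl l : List Char) :
    (c :: bl <:+ l) ↔ ∃ k : Nat, k < l.length ∧ l[k]? = some c ∧ l.drop (k + 1) = bl := by
  constructor
  · rintro ⟨t, rfl⟩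
    refine ⟨t.length, by simp, by simp, by simp [List.drop_append]⟩
  · rintro ⟨k, hk, hget, hdrop⟩
    refine ⟨l.take k, ?_⟩
    have hc : l[k] = c := by
      have := hget
      rw [List.getElem?_eq_getElem hk] at this
      exact Option.some.inj this
    have h1 : l.drop k = c :: bl := by
      rw [List.drop_eq_getElem_cons hk, hdrop, hc]
    calc l.take k ++ c :: bl = l.take k ++ l.drop k := by rw [h1]
      _ = l := List.take_append_drop k l

lemma mem_pvSufs (h b : String) :
    b ∈ pvSufs h ↔ ∃ k : Nat, k < h.toList.length ∧ h.toList[k]? = some '.' ∧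
      h.toList.drop (k + 1) = b.toList := by
  unfold pvSufs
  simp only [List.mem_map, List.mem_filter, PySem.List.mem_enumerate_iff]
  constructor
  · rintro ⟨p, ⟨⟨k, hk, rfl⟩, hdot⟩, hb⟩
    simp only [beq_iff_eq] at hdot
    refine ⟨k, hk, ?_, ?_⟩
    · rw [List.getElem?_eq_getElem hk, hdot]
    · rw [← hb]
      have e : ((0 + (k : Int), h.toList[k]).1 + 1) = ((k : Int) + 1) := by push_cast; ring
      rw [e, pvSliceTail]
  · rintro ⟨k, hk, hget, hdrop⟩
    have hc : h.toList[k] = '.' := by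
      rw [List.getElem?_eq_getElem hk] at hget
      exact Option.some.inj hget
    refine ⟨((0 : Int) + k, h.toList[k]), ⟨⟨k, hk, rfl⟩, by simp [hc]⟩, ?_⟩
    apply String.toList_inj.mp
    have e : ((0 + (k : Int), h.toList[k]).1 + 1) = ((k : Int) + 1) := by push_cast; ring
    rw [e, pvSliceTail, hdrop]

lemma endswith_iff_mem_sufs (h b : String) :
    PySem.Str.endswith h ("." ++ b) = true ↔ b ∈ pvSufs h := by
  rw [mem_pvSufs, PySem.Str.endswith_eq, PySem.Chars.endswith_iff,
    show ("." ++ b).toList = '.' :: b.toList by simp, cons_suffix_iff]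

lemma any_endswith_eq (h : String) (L : List String) :
    L.any (fun b => PySem.Str.endswith h ("." ++ b)) = (pvSufs h).any (fun s => L.contains s) := by
  rw [Bool.eq_iff_iff]
  simp only [List.any_eq_true, List.contains_eq_mem, decide_eq_true_eq]
  constructor
  · rintro ⟨b, hbL, hb⟩
    exact ⟨b, (endswith_iff_mem_sufs h b).mp hb, hbL⟩
  · rintro ⟨s, hs, hsL⟩
    exact ⟨s, hsL, (endswith_iff_mem_sufs h s).mpr hs⟩

lemma core_eq (host : String) : reliability_tier_for_host host = reliability_tier_for_host_alt host := by
  unfold reliability_tier_for_host reliability_tier_for_host_alt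
  generalize pvCanonHost host = h
  by_cases h0 : h = ""
  · subst h0
    simp only [reduceIte]
  · rw [if_neg h0, if_neg h0, any_endswith_eq h pvT1, any_endswith_eq h pvT2, any_endswith_eq h pvLow]
    simp only [pvTiers, List.find?_cons, List.find?_nil]
    cases e1 : pvT1.contains h <;> cases e2 : pvT2.contains h <;> cases e3 : pvLow.contains h <;>
      cases s1 : (pvSufs h).any (fun s => pvT1.contains s) <;>
      cases s2 : (pvSufs h).any (fun s => pvT2.contains s) <;>
      cases s3 : (pvSufs h).any (fun s => pvLow.contains s) <;>
      simp only [e1, e2, e3, s1, s2, s3, cond_true, cond_false, if_true, if_false,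
        Bool.false_eq_true, ite_false, ite_true]

-- ===== VERDICT (by name: the statement is the Claim_ definition above) =====
theorem reliability_tier_for_host_spec : Claim_equal_reliability_tier_for_host := by
  intro host _
  unfold Spec_reliability_tier_for_host
  exact core_eq host
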